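-- pv_equiv track=rewrite | github.com/ZUB3C/InformaticEge | type_18/27415.py | find_max_min_coins_route
-- ===== SOURCE A (Python) =====
-- from typing import List, Tuple
--
-- def find_max_min_coins_route(matrix: List[List[int]]) -> Tuple[int, int]:
--     n = len(matrix)
--
--     max_dp = [[0] * n for _ in range(n)]
--     min_dp = [[0] * n for _ in range(n)]
--
--     # Заполняем первую строку и первый столбец матриц
--     for i in range(n):
--         max_dp[0][i] = min_dp[0][i] = sum(matrix[0][:i + 1])
--         max_dp[i][0] = min_dp[i][0] = sum(row[0] for row in matrix[:i + 1])
--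
--     for i in range(1, n):
--         for j in range(1, n):
--             max_dp[i][j] = matrix[i][j] + max(max_dp[i - 1][j], max_dp[i][j - 1])
--             min_dp[i][j] = matrix[i][j] + min(min_dp[i - 1][j], min_dp[i][j - 1])
--
--     return max_dp[n - 1][n - 1], min_dp[n - 1][n - 1]
-- ===== SOURCE B (Python) =====
-- from typing import List, Tuple
--
-- def find_max_min_coins_route(matrix: List[List[int]]) -> Tuple[int, int]:
--     memo = {}
--
--     def cell(i: int, j: int) -> Tuple[int, int]:
--         if (i, j) in memo:
--             return memo[(i, j)]
--         v = matrix[i][j]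
--         if i == 0 and j == 0:
--             r = (v, v)
--         elif i == 0:
--             hi, lo = cell(0, j - 1)
--             r = (v + hi, v + lo)
--         elif j == 0:
--             hi, lo = cell(i - 1, 0)
--             r = (v + hi, v + lo)
--         else:
--             up = cell(i - 1, j)
--             left = cell(i, j - 1)
--             r = (v + max(up[0], left[0]), v + min(up[1], left[1]))
--         memo[(i, j)] = r
--         return r
--
--     n = len(matrix)
--     return cell(n - 1, n - 1)
-- ===== Notes on version B (the rewrite author's own statement) =====
-- stated objective: alternative
-- what changed: Replaces A's bottom-up construction of two full n*n DP tables (with a separate prefix-sum pass for the first row/column) by a single top-down memoized recursion cell(i,j) that returns the (max,min) pair ending at (i,j).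
-- outside the precondition, e.g. on find_max_min_coins_route([[1], [2, 3]]): A returns (6, 4), B raises IndexError
import Mathlib
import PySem

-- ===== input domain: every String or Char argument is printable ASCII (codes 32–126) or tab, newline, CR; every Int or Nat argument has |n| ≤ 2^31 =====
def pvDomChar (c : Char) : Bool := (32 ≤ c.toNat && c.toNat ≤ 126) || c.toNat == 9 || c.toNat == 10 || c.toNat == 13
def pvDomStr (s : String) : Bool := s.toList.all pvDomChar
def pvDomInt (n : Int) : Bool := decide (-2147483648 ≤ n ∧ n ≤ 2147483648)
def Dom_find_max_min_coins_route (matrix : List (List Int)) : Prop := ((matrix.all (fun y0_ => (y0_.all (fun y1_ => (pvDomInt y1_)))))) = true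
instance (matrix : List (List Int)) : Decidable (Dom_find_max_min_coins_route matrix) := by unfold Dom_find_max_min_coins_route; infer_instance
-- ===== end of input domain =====

-- B re-implements A's two bottom-up n×n DP tables as one top-down recursion cell(i,j)
-- returning the (max,min) pair; Python B memoizes cell in a dict — the cache only avoids
-- recomputation and changes no value, so the port writes the same recursion directly.

-- ===== PORT A =====
-- read t[a][b]; on Pre_ every read A performs is in range (out of range Python raises,
-- and those inputs are excluded by Pre_)
def pvRd (t : List (List Int)) (a b : Nat) : Int := (t.getD a []).getD b 0

-- t[a][b] = v
def pvSet2 (t : List (List Int)) (a b : Nat) (v : Int) : List (List Int) :=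
  t.set a ((t.getD a []).set b v)

-- the n×n zero table [[0] * n for _ in range(n)]
def pvZ (n : Nat) : List (List Int) := List.replicate n (List.replicate n 0)

-- body of A's first loop: max_dp[0][i] = min_dp[0][i] = sum(matrix[0][:i+1]);
-- max_dp[i][0] = min_dp[i][0] = sum(row[0] for row in matrix[:i+1])
def pvStep1 (matrix : List (List Int)) (st : List (List Int) × List (List Int)) (i : Nat) :
    List (List Int) × List (List Int) :=
  let v1 : Int := ((matrix.getD 0 []).take (i + 1)).sum
  let v2 : Int := ((matrix.take (i + 1)).map (fun r => r.getD 0 (0 : Int))).sum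
  (pvSet2 (pvSet2 st.1 0 i v1) i 0 v2, pvSet2 (pvSet2 st.2 0 i v1) i 0 v2)

-- body of A's inner loop: max_dp[i][j] = matrix[i][j] + max(max_dp[i-1][j], max_dp[i][j-1]);
-- min_dp[i][j] = matrix[i][j] + min(min_dp[i-1][j], min_dp[i][j-1])
def pvStep2 (matrix : List (List Int)) (i : Nat)
    (st : List (List Int) × List (List Int)) (j : Nat) :
    List (List Int) × List (List Int) :=
  (pvSet2 st.1 i j (pvRd matrix i j + max (pvRd st.1 (i - 1) j) (pvRd st.1 i (j - 1))),
   pvSet2 st.2 i j (pvRd matrix i j + min (pvRd st.2 (i - 1) j) (pvRd st.2 i (j - 1))))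

-- body of A's outer loop: for j in range(1, n): …
def pvOuter (matrix : List (List Int)) (n : Nat)
    (st : List (List Int) × List (List Int)) (i : Nat) :
    List (List Int) × List (List Int) :=
  (List.range' 1 (n - 1)).foldl (pvStep2 matrix i) st

-- literal transliteration of A: two zero tables, the first-row/first-column prefix-sum
-- loop, the nested i,j loops, then (max_dp[n-1][n-1], min_dp[n-1][n-1])
-- (those final reads raise IndexError in Python when n = 0; excluded by Pre_).
def find_max_min_coins_route (matrix : List (List Int)) : Int × Int :=
  let n := matrix.length
  let st1 := (List.range n).foldl (pvStep1 matrix) (pvZ n, pvZ n)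
  let st2 := (List.range' 1 (n - 1)).foldl (pvOuter matrix n) st1
  (pvRd st2.1 (n - 1) (n - 1), pvRd st2.2 (n - 1) (n - 1))

-- ===== PORT B =====
-- cell i j = (max-sum, min-sum) of a path from (0,0) to (i,j); B's memo dict is a pure
-- cache, ported as the recursion itself (matrix[i][j] is in range on Pre_).
def pvCell (matrix : List (List Int)) : Nat → Nat → Int × Int
  | 0, 0 =>
    let v := (matrix.getD 0 []).getD 0 0
    (v, v)
  | 0, j + 1 =>
    let v := (matrix.getD 0 []).getD (j + 1) 0
    let p := pvCell matrix 0 j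
    (v + p.1, v + p.2)
  | i + 1, 0 =>
    let v := (matrix.getD (i + 1) []).getD 0 0
    let p := pvCell matrix i 0
    (v + p.1, v + p.2)
  | i + 1, j + 1 =>
    let v := (matrix.getD (i + 1) []).getD (j + 1) 0
    let up := pvCell matrix i (j + 1)
    let left := pvCell matrix (i + 1) j
    (v + max up.1 left.1, v + min up.2 left.2)
  termination_by i j => (i, j)

def find_max_min_coins_route_alt (matrix : List (List Int)) : Int × Int :=
  let n := matrix.length
  pvCell matrix (n - 1) (n - 1)

-- ===== PRECONDITION & SPEC =====
-- Pre_ excludes exactly the inputs where one of the Pythons raises IndexError: the empty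
-- matrix (A's max_dp[-1][-1]) and matrices with a row shorter than len(matrix) — on rows
-- i ≥ 1 A itself raises at matrix[i][j]/row[0]; when only row 0 is short A still returns
-- (its slice sum(matrix[0][:i+1]) silently truncates) but B's indexing matrix[0][j] raises,
-- so those ragged inputs are excluded too. Rows longer than len(matrix) are admitted.
def Pre_find_max_min_coins_route (matrix : List (List Int)) : Prop :=
  matrix ≠ [] ∧ ∀ row ∈ matrix, matrix.length ≤ row.length
instance (matrix : List (List Int)) : Decidable (Pre_find_max_min_coins_route matrix) := by
  unfold Pre_find_max_min_coins_route; infer_instance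

def pvWitness_find_max_min_coins_route : List (List Int) := [[1, 2], [3, 4]]

def Spec_find_max_min_coins_route (matrix : List (List Int)) (out : Int × Int) : Prop := out = find_max_min_coins_route_alt matrix
instance (matrix : List (List Int)) (out : Int × Int) : Decidable (Spec_find_max_min_coins_route matrix out) := by unfold Spec_find_max_min_coins_route; infer_instance

-- ===== CLAIM (what is proved, stated in full; the proofs are below) =====
def Claim_equal_find_max_min_coins_route : Prop := ∀ (matrix : List (List Int)), Dom_find_max_min_coins_route matrix → Pre_find_max_min_coins_route matrix → Spec_find_max_min_coins_route matrix (find_max_min_coins_route matrix)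

-- ===== LEMMAS AND PROOFS =====

theorem pvGetD_set_eq {a : Type} (l : List a) (i : Nat) (x d : a) (h : i < l.length) :
    (l.set i x).getD i d = x := by
  rw [List.getD_eq_getElem?_getD, List.getElem?_set_self h]; rfl

theorem pvGetD_set_ne {a : Type} (l : List a) {i j : Nat} (x d : a) (h : i ≠ j) :
    (l.set i x).getD j d = l.getD j d := by
  rw [List.getD_eq_getElem?_getD, List.getElem?_set_ne h, ← List.getD_eq_getElem?_getD]

-- sum of a prefix extended by one element, total form (getD is 0 out of range, take saturates)
theorem pvSumTakeSucc (xs : List Int) (k : Nat) :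
    (xs.take (k + 1)).sum = (xs.take k).sum + xs.getD k 0 := by
  rw [List.take_add_one, List.sum_append, List.getD_eq_getElem?_getD]
  cases xs[k]? <;> simp

-- reading the first column of a row list through map commutes with getD
theorem pvGetDMapRow (l : List (List Int)) (k : Nat) :
    (l.map (fun r => r.getD 0 (0 : Int))).getD k 0 = (l.getD k []).getD 0 0 := by
  simp only [List.getD_eq_getElem?_getD, List.getElem?_map]
  cases h : l[k]? <;> simp

-- the two first-corner initialisations coincide: sum(matrix[0][:1]) = sum(row[0] for row in matrix[:1])
theorem pvCorner (matrix : List (List Int)) :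
    ((matrix.take 1).map (fun r => r.getD 0 (0 : Int))).sum = ((matrix.getD 0 []).take 1).sum := by
  rw [List.map_take, pvSumTakeSucc (matrix.map fun r => r.getD 0 (0 : Int)) 0,
    pvSumTakeSucc (matrix.getD 0 []) 0, pvGetDMapRow]
  simp

-- first-row prefix sums are B's cells on the top edge
theorem pvCell_row0 (matrix : List (List Int)) (j : Nat) :
    pvCell matrix 0 j =
      (((matrix.getD 0 []).take (j + 1)).sum, ((matrix.getD 0 []).take (j + 1)).sum) := by
  induction j with
  | zero =>
    rw [pvCell, pvSumTakeSucc (matrix.getD 0 []) 0]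
    simp
  | succ j ih =>
    rw [pvCell, ih, pvSumTakeSucc (matrix.getD 0 []) (j + 1)]
    dsimp only
    rw [Prod.mk.injEq]
    constructor <;> ring

-- first-column prefix sums are B's cells on the left edge
theorem pvCell_col0 (matrix : List (List Int)) (i : Nat) :
    pvCell matrix i 0 =
      (((matrix.take (i + 1)).map (fun r => r.getD 0 (0 : Int))).sum,
       ((matrix.take (i + 1)).map (fun r => r.getD 0 (0 : Int))).sum) := by
  induction i with
  | zero =>
    rw [pvCell, pvCorner, pvSumTakeSucc (matrix.getD 0 []) 0]
    simp
  | succ i ih =>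
    rw [pvCell, ih, List.map_take, List.map_take,
      pvSumTakeSucc (matrix.map fun r => r.getD 0 (0 : Int)) (i + 1), pvGetDMapRow]
    dsimp only
    rw [Prod.mk.injEq]
    constructor <;> ring

def pvShape (n : Nat) (t : List (List Int)) : Prop :=
  t.length = n ∧ ∀ r ∈ t, r.length = n

theorem pvShape_getD {n : Nat} {t : List (List Int)} (h : pvShape n t) {a : Nat} (ha : a < n) :
    (t.getD a []).length = n := by
  obtain ⟨hl, hr⟩ := h
  rw [List.getD_eq_getElem?_getD, List.getElem?_eq_getElem (by omega), Option.getD_some]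
  exact hr _ (List.getElem_mem _)

theorem pvShape_set2 {n : Nat} {t : List (List Int)} (h : pvShape n t)
    {a : Nat} (ha : a < n) (b : Nat) (v : Int) :
    pvShape n (pvSet2 t a b v) := by
  have hrow := pvShape_getD h ha
  obtain ⟨hl, hr⟩ := h
  refine ⟨by simp [pvSet2, hl], ?_⟩
  intro r hmem
  rcases List.mem_or_eq_of_mem_set hmem with h1 | h1
  · exact hr r h1
  · subst h1; rw [List.length_set]; exact hrow

theorem pvRd_set2 {n : Nat} {t : List (List Int)} (h : pvShape n t)
    {a b : Nat} (ha : a < n) (hb : b < n) (v : Int) (x y : Nat) :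
    pvRd (pvSet2 t a b v) x y = if x = a ∧ y = b then v else pvRd t x y := by
  have hrow := pvShape_getD h ha
  obtain ⟨hl, hr⟩ := h
  unfold pvRd pvSet2
  by_cases hx : x = a
  · subst hx
    rw [pvGetD_set_eq t x _ [] (by omega)]
    by_cases hy : y = b
    · subst hy
      rw [pvGetD_set_eq _ y v 0 (by omega)]
      simp
    · rw [pvGetD_set_ne _ v 0 (fun hh => hy hh.symm)]
      simp [hy]
  · rw [pvGetD_set_ne t _ [] (fun hh => hx hh.symm)]
    simp [hx]

theorem pvShape_pvZ (n : Nat) : pvShape n (pvZ n) := by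
  refine ⟨by simp [pvZ], ?_⟩
  intro r hr
  rw [List.eq_of_mem_replicate hr]
  simp

theorem pvGetD_replicate {a : Type} (n i : Nat) (x d : a) :
    (List.replicate n x).getD i d = if i < n then x else d := by
  rw [List.getD_eq_getElem?_getD, List.getElem?_replicate]
  split <;> simp

theorem pvRd_pvZ (n a b : Nat) : pvRd (pvZ n) a b = 0 := by
  unfold pvRd pvZ
  rw [pvGetD_replicate]
  split
  · rw [pvGetD_replicate]; split <;> rfl
  · simp

-- value of A's tables after the first loop has processed range(k)
def pvF1 (matrix : List (List Int)) (k a b : Nat) : Int :=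
  if a = 0 ∧ b < k then ((matrix.getD 0 []).take (b + 1)).sum
  else if b = 0 ∧ a < k then ((matrix.take (a + 1)).map (fun r => r.getD 0 (0 : Int))).sum
  else 0

theorem pvPhase1_inv (matrix : List (List Int)) (n : Nat) : ∀ k, k ≤ n →
    ((List.range k).foldl (pvStep1 matrix) (pvZ n, pvZ n)).1 =
      ((List.range k).foldl (pvStep1 matrix) (pvZ n, pvZ n)).2 ∧
    pvShape n ((List.range k).foldl (pvStep1 matrix) (pvZ n, pvZ n)).1 ∧
    ∀ a b, a < n → b < n →
      pvRd ((List.range k).foldl (pvStep1 matrix) (pvZ n, pvZ n)).1 a b = pvF1 matrix k a b := by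
  intro k
  induction k with
  | zero =>
    intro _
    refine ⟨rfl, pvShape_pvZ n, ?_⟩
    intro a b _ _
    rw [List.range_zero, List.foldl_nil, pvRd_pvZ, pvF1]
    simp
  | succ k ih =>
    intro hk
    obtain ⟨heq, hsh, hrd⟩ := ih (by omega)
    rw [List.range_succ, List.foldl_append, List.foldl_cons, List.foldl_nil]
    set st := (List.range k).foldl (pvStep1 matrix) (pvZ n, pvZ n) with hst
    have hk' : k < n := by omega
    have h0 : 0 < n := by omega
    have hsh1 : pvShape n (pvSet2 st.1 0 k (((matrix.getD 0 []).take (k + 1)).sum)) :=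
      pvShape_set2 hsh h0 _ _
    refine ⟨by rw [pvStep1, ← heq], ⟨pvShape_set2 hsh1 hk' _ _, ?_⟩⟩
    intro a b ha hb
    rw [pvStep1]
    dsimp only
    rw [pvRd_set2 hsh1 hk' h0, pvRd_set2 hsh h0 hk', hrd a b ha hb]
    by_cases h1 : a = k ∧ b = 0
    · obtain ⟨rfl, rfl⟩ := h1
      rw [if_pos ⟨rfl, rfl⟩]
      by_cases hk0 : a = 0
      · subst hk0
        rw [pvF1, if_pos ⟨rfl, by omega⟩]
        exact pvCorner matrix
      · rw [pvF1, if_neg (fun hh => hk0 hh.1), if_pos ⟨rfl, by omega⟩]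
    · rw [if_neg h1]
      by_cases h2 : a = 0 ∧ b = k
      · obtain ⟨rfl, rfl⟩ := h2
        rw [if_pos ⟨rfl, rfl⟩, pvF1, if_pos ⟨rfl, by omega⟩]
      · rw [if_neg h2]
        unfold pvF1
        split_ifs <;> first | rfl | omega

-- invariant of phase 2: edges plus rows 1..i-1 complete plus row i through column j
def pvInv (matrix : List (List Int)) (n i j : Nat)
    (st : List (List Int) × List (List Int)) : Prop :=
  pvShape n st.1 ∧ pvShape n st.2 ∧
    ∀ a b, a < n → b < n →
      (a = 0 ∨ b = 0 ∨ (1 ≤ a ∧ 1 ≤ b ∧ (a < i ∨ (a = i ∧ b ≤ j)))) →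
        pvRd st.1 a b = (pvCell matrix a b).1 ∧ pvRd st.2 a b = (pvCell matrix a b).2

theorem pvInner_inv (matrix : List (List Int)) (n i : Nat) (hi1 : 1 ≤ i) (hi : i < n) :
    ∀ j, j ≤ n - 1 → ∀ st, pvInv matrix n i 0 st →
      pvInv matrix n i j ((List.range' 1 j).foldl (pvStep2 matrix i) st) := by
  intro j
  induction j with
  | zero =>
    intro _ st h
    exact h
  | succ j ih =>
    intro hj st h
    obtain ⟨h1, h2, hrd⟩ := ih (by omega) st h
    rw [List.range'_concat, List.foldl_append, List.foldl_cons, List.foldl_nil,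
      show (1 : Nat) + 1 * j = j + 1 by omega]
    set st' := (List.range' 1 j).foldl (pvStep2 matrix i) st with hst'
    have hjn : j + 1 < n := by omega
    obtain ⟨i', rfl⟩ : ∃ i', i = i' + 1 := ⟨i - 1, by omega⟩
    -- the two reads feeding the update are already-correct cells
    have hup : pvRd st'.1 i' (j + 1) = (pvCell matrix i' (j + 1)).1 ∧
        pvRd st'.2 i' (j + 1) = (pvCell matrix i' (j + 1)).2 := by
      apply hrd i' (j + 1) (by omega) hjn
      rcases Nat.eq_zero_or_pos i' with h' | h'
      · left; omega
      · right; right; exact ⟨by omega, by omega, by omega⟩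
    have hleft : pvRd st'.1 (i' + 1) j = (pvCell matrix (i' + 1) j).1 ∧
        pvRd st'.2 (i' + 1) j = (pvCell matrix (i' + 1) j).2 := by
      apply hrd (i' + 1) j (by omega) (by omega)
      rcases Nat.eq_zero_or_pos j with h' | h'
      · right; left; omega
      · right; right; exact ⟨by omega, by omega, by omega⟩
    refine ⟨pvShape_set2 h1 (by omega) _ _, pvShape_set2 h2 (by omega) _ _, ?_⟩
    intro a b ha hb hcond
    rw [pvStep2]
    dsimp only
    rw [pvRd_set2 h1 (show i' + 1 < n by omega) hjn, pvRd_set2 h2 (show i' + 1 < n by omega) hjn]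
    simp only [show (i' + 1) - 1 = i' from rfl, Nat.add_sub_cancel]
    by_cases hab : a = i' + 1 ∧ b = j + 1
    · obtain ⟨rfl, rfl⟩ := hab
      rw [if_pos ⟨rfl, rfl⟩, if_pos ⟨rfl, rfl⟩, hup.1, hup.2, hleft.1, hleft.2, pvCell]
      exact ⟨rfl, rfl⟩
    · rw [if_neg hab, if_neg hab]
      apply hrd a b ha hb
      rcases hcond with h' | h' | ⟨hx, hy, h' | ⟨h', h''⟩⟩
      · left; exact h'
      · right; left; exact h'
      · right; right; exact ⟨hx, hy, Or.inl h'⟩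
      · right; right
        refine ⟨hx, hy, Or.inr ⟨h', ?_⟩⟩
        rcases Nat.lt_or_ge b (j + 1) with hb' | hb'
        · omega
        · exact absurd ⟨h', by omega⟩ hab

theorem pvOuter_inv (matrix : List (List Int)) (n : Nat) :
    ∀ i, i ≤ n - 1 → ∀ st, pvInv matrix n 0 0 st →
      pvInv matrix n i (n - 1) ((List.range' 1 i).foldl (pvOuter matrix n) st) := by
  intro i
  induction i with
  | zero =>
    intro _ st ⟨h1, h2, hrd⟩
    refine ⟨h1, h2, ?_⟩
    intro a b ha hb hcond
    apply hrd a b ha hb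
    rcases hcond with h' | h' | ⟨hx, _, h' | ⟨h', _⟩⟩
    · left; exact h'
    · right; left; exact h'
    · omega
    · omega
  | succ i ih =>
    intro hi st h
    rw [List.range'_concat, List.foldl_append, List.foldl_cons, List.foldl_nil,
      show (1 : Nat) + 1 * i = i + 1 by omega]
    obtain ⟨h1, h2, hrd⟩ := ih (by omega) st h
    have hstart : pvInv matrix n (i + 1) 0 ((List.range' 1 i).foldl (pvOuter matrix n) st) := by
      refine ⟨h1, h2, ?_⟩
      intro a b ha hb hcond
      apply hrd a b ha hb
      rcases hcond with h' | h' | ⟨hx, hy, h' | ⟨_, h'⟩⟩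
      · left; exact h'
      · right; left; exact h'
      · rcases Nat.lt_or_ge a (i + 1) with _ | _
        · right; right; refine ⟨hx, hy, ?_⟩
          rcases Nat.lt_or_ge a i with _ | _
          · left; omega
          · right; exact ⟨by omega, by omega⟩
        · omega
      · omega
    exact pvInner_inv matrix n (i + 1) (by omega) (by omega) (n - 1) (le_refl _) _ hstart

-- ===== VERDICT (by name: the statement is the Claim_ definition above) =====
theorem find_max_min_coins_route_spec : Claim_equal_find_max_min_coins_route := by
  intro matrix _ hpre
  obtain ⟨hne, _⟩ := hpre
  unfold Spec_find_max_min_coins_route find_max_min_coins_route find_max_min_coins_route_alt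
  dsimp only
  set n := matrix.length with hn
  have hn1 : 1 ≤ n := by
    cases matrix with
    | nil => exact absurd rfl hne
    | cons x xs => simp [hn]
  obtain ⟨heq, hsh, hrd⟩ := pvPhase1_inv matrix n n (le_refl n)
  set st1 := (List.range n).foldl (pvStep1 matrix) (pvZ n, pvZ n) with hst1
  have hinv0 : pvInv matrix n 0 0 st1 := by
    refine ⟨hsh, heq ▸ hsh, ?_⟩
    intro a b ha hb hcond
    have h2 : pvRd st1.2 a b = pvRd st1.1 a b := by rw [heq]
    rcases hcond with h' | h' | ⟨_, _, h' | ⟨h', _⟩⟩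
    · subst h'
      rw [h2, hrd 0 b (by omega) hb, pvF1, if_pos ⟨rfl, hb⟩, pvCell_row0]
      exact ⟨rfl, rfl⟩
    · subst h'
      rw [h2, hrd a 0 ha (by omega), pvF1, pvCell_col0]
      by_cases ha0 : a = 0
      · subst ha0
        rw [if_pos ⟨rfl, by omega⟩, pvCorner]
        exact ⟨rfl, rfl⟩
      · rw [if_neg (fun hh => ha0 hh.1), if_pos ⟨rfl, ha⟩]
        exact ⟨rfl, rfl⟩
    · omega
    · omega
  have hfin := pvOuter_inv matrix n (n - 1) (le_refl _) st1 hinv0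
  obtain ⟨_, _, hrd2⟩ := hfin
  have hread := hrd2 (n - 1) (n - 1) (by omega) (by omega) ?_
  · rw [hread.1, hread.2]
  · rcases Nat.eq_or_lt_of_le hn1 with h1 | h1
    · left; omega
    · right; right; exact ⟨by omega, by omega, Or.inr ⟨rfl, le_refl _⟩⟩
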